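-- pv_equiv track=rewrite | github.com/vigneshsabapathi/python-algorithms | maths/sylvester_sequence.py | sylvester
-- ===== SOURCE A (Python) =====
-- from typing import List
--
-- def sylvester(n: int) -> List[int]:
--     """
--     Return the first ``n`` terms of Sylvester's sequence.
--
--     >>> sylvester(1)
--     [2]
--     >>> sylvester(5)
--     [2, 3, 7, 43, 1807]
--     >>> sylvester(0)
--     []
--     """
--     if n < 0:
--         raise ValueError("n must be non-negative")
--     out: List[int] = []
--     cur = 2
--     for _ in range(n):
--         out.append(cur)
--         cur = cur * cur - cur + 1
--     return out
-- ===== SOURCE B (Python) =====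
-- from typing import List
--
-- def _tail(k: int, prod: int) -> List[int]:
--     """Terms of Sylvester's sequence built front-first by recursion on k,
--     using the identity a = 1 + product of all previous terms."""
--     if k == 0:
--         return []
--     term = prod + 1
--     return [term] + _tail(k - 1, prod * term)
--
-- def sylvester(n: int) -> List[int]:
--     if n < 0:
--         raise ValueError("n must be non-negative")
--     return _tail(n, 1)
-- ===== Notes on version B (the rewrite author's own statement) =====
-- stated objective: alternative
-- what changed: B replaces A's tail loop with an append accumulator and the quadratic recurrence cur*cur-cur+1 by a front-first recursion that conses each term, computed as one plus the running product of the terms emitted so far (Sylvester's identity).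
import Mathlib
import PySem

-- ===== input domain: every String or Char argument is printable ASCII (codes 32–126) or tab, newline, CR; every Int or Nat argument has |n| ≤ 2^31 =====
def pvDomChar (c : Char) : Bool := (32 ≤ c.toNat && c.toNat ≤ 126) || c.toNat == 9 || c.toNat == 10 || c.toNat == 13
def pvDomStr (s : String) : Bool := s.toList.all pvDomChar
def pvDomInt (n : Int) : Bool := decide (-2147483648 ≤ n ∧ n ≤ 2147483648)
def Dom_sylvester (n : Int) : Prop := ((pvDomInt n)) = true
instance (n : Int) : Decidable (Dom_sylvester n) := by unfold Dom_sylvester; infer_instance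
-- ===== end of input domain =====

-- B builds the list front-first by recursion, each term being one plus the running
-- product of all previous terms (Sylvester's identity), instead of A's append-
-- accumulator loop on the quadratic recurrence cur*cur - cur + 1.
-- ===== PORT A =====
-- loop: for _ in range(n): out.append(cur); cur = cur*cur - cur + 1
def sylvesterLoopA (k : Nat) (out : List Int) (cur : Int) : List Int :=
  match k with
  | 0 => out
  | k + 1 => sylvesterLoopA k (out ++ [cur]) (cur * cur - cur + 1)

def sylvester (n : Int) : List Int :=
  -- the n < 0 branch raises ValueError in Python: excluded by Pre_sylvester
  sylvesterLoopA n.toNat [] 2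

-- ===== PORT B =====
-- _tail(k, prod): [] when k == 0, else [prod+1] + _tail(k-1, prod*(prod+1))
def sylvesterTail : Nat → Int → List Int
  | 0, _ => []
  | k + 1, prod => (prod + 1) :: sylvesterTail k (prod * (prod + 1))

def sylvester_alt (n : Int) : List Int :=
  -- the n < 0 branch raises ValueError in Python: excluded by Pre_sylvester
  sylvesterTail n.toNat 1

-- ===== PRECONDITION & SPEC =====
-- Pre_ excludes negative n, on which both Pythons raise ValueError.
def Pre_sylvester (n : Int) : Prop := 0 ≤ n
instance (n : Int) : Decidable (Pre_sylvester n) := by unfold Pre_sylvester; infer_instance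
def pvWitness_sylvester : Int := (5)

def Spec_sylvester (n : Int) (out : List Int) : Prop := out = sylvester_alt n
instance (n : Int) (out : List Int) : Decidable (Spec_sylvester n out) := by unfold Spec_sylvester; infer_instance

-- ===== CLAIM (what is proved, stated in full; the proofs are below) =====
def Claim_equal_sylvester : Prop := ∀ (n : Int), Dom_sylvester n → Pre_sylvester n → Spec_sylvester n (sylvester n)

-- ===== LEMMAS AND PROOFS =====
-- Invariant: A's running term equals B's running product plus one; A's quadratic step
-- (p+1)² - (p+1) + 1 equals B's product step p(p+1) + 1, and the append accumulator
-- collects exactly the front-first list.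
theorem loopA_eq_tail (k : Nat) : ∀ (out : List Int) (p : Int),
    sylvesterLoopA k out (p + 1) = out ++ sylvesterTail k p := by
  induction k with
  | zero => intro out p; simp [sylvesterLoopA, sylvesterTail]
  | succ k ih =>
    intro out p
    have h : (p + 1) * (p + 1) - (p + 1) + 1 = p * (p + 1) + 1 := by ring
    simp only [sylvesterLoopA, sylvesterTail, h, ih, List.append_assoc,
      List.singleton_append]

-- ===== VERDICT =====
theorem sylvester_spec : Claim_equal_sylvester := by
  intro n _ _
  unfold Spec_sylvester sylvester sylvester_alt
  exact loopA_eq_tail n.toNat [] 1
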